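-- pv_equiv track=rewrite | github.com/CiscoDevNet/sastre | lib/catalog.py | sequenced_tags
-- ===== SOURCE A (Python) =====
-- CATALOG_TAG_ALL = 'all'
--
-- _tag_dependency_list = [
--     'template_device',
--     'template_feature',
--     'policy_vsmart',
--     'policy_vedge',
--     'policy_definition',
--     'policy_list',
-- ]
--
-- def sequenced_tags(tag):
--     """
--     Generator which yields the specified tag plus any 'child' tags (i.e. dependent tags), as defined by
--     _tag_dependency_list. If special tag 'all' is used, all items from _tag_dependency_list are yielded.
--     :param tag: tag string or 'all'
--     :return: Selected tags in order, as per _tag_dependency_list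
--     """
--     find_tag = (tag == CATALOG_TAG_ALL)
--     for item in _tag_dependency_list:
--         if not find_tag:
--             if item == tag:
--                 find_tag = True
--             else:
--                 continue
--         yield item
-- ===== SOURCE B (Python) =====
-- CATALOG_TAG_ALL = 'all'
--
-- _tag_dependency_list = [
--     'template_device',
--     'template_feature',
--     'policy_vsmart',
--     'policy_vedge',
--     'policy_definition',
--     'policy_list',
-- ]
--
-- def sequenced_tags(tag):
--     if tag == CATALOG_TAG_ALL:
--         start = 0
--     elif tag in _tag_dependency_list:
--         start = _tag_dependency_list.index(tag)
--     else:
--         return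
--     yield from _tag_dependency_list[start:]
-- ===== Notes on version B (the rewrite author's own statement) =====
-- stated objective: simpler
-- what changed: B computes the start position once (0 for 'all', list.index for a known tag, nothing otherwise) and yields the list suffix in bulk, instead of A's per-element loop with a boolean flag.
import Mathlib
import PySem

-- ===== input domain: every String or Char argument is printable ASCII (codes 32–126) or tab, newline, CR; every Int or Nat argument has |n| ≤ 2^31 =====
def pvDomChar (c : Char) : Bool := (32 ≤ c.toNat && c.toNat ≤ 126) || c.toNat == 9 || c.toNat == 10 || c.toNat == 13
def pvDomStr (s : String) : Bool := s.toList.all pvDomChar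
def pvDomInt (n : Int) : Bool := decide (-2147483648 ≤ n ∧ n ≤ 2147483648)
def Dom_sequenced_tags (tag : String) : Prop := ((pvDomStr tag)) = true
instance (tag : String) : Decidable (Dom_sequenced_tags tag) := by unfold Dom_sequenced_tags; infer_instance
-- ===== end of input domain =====

-- ===== PORT A =====
-- B computes the start index once and returns the list suffix, instead of A's flag-filter loop (objective: simpler).
def pvTagDepList : List String :=
  ["template_device", "template_feature", "policy_vsmart", "policy_vedge",
   "policy_definition", "policy_list"]

-- literal port of A's loop: state = (find_tag flag, accumulated yields)
def sequenced_tags (tag : String) : List String :=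
  (pvTagDepList.foldl (fun (st : Bool × List String) item =>
    if !st.1 then
      if item == tag then (true, st.2 ++ [item]) else st
    else (st.1, st.2 ++ [item]))
    (tag == "all", [])).2

-- ===== PORT B =====
def sequenced_tags_alt (tag : String) : List String :=
  if tag == "all" then pvTagDepList.drop 0
  else match PySem.List.index? pvTagDepList tag with
    | some start => PySem.List.slice pvTagDepList (some (start : Int)) none
    | none => []

-- ===== PRECONDITION & SPEC =====
def Spec_sequenced_tags (tag : String) (out : List String) : Prop := out = sequenced_tags_alt tag
instance (tag : String) (out : List String) : Decidable (Spec_sequenced_tags tag out) := by unfold Spec_sequenced_tags; infer_instance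

-- ===== CLAIM (what is proved, stated in full; the proofs are below) =====
def Claim_equal_sequenced_tags : Prop := ∀ (tag : String), Dom_sequenced_tags tag → Spec_sequenced_tags tag (sequenced_tags tag)

-- ===== LEMMAS AND PROOFS =====

-- ===== VERDICT (by name: the statement is the Claim_ definition above) =====
theorem sequenced_tags_spec : Claim_equal_sequenced_tags := by
  intro tag _
  unfold Spec_sequenced_tags sequenced_tags sequenced_tags_alt
  by_cases h0 : tag = "all"
  · subst h0; decide
  by_cases h1 : tag = "template_device"
  · subst h1; decide
  by_cases h2 : tag = "template_feature"
  · subst h2; decide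
  by_cases h3 : tag = "policy_vsmart"
  · subst h3; decide
  by_cases h4 : tag = "policy_vedge"
  · subst h4; decide
  by_cases h5 : tag = "policy_definition"
  · subst h5; decide
  by_cases h6 : tag = "policy_list"
  · subst h6; decide
  have hmem : tag ∉ pvTagDepList := by
    simp [pvTagDepList]
    exact ⟨h1, h2, h3, h4, h5, h6⟩
  rw [(PySem.List.index?_eq_none_iff pvTagDepList tag).mpr hmem]
  simp [pvTagDepList, List.foldl, h0, Ne.symm h1, Ne.symm h2, Ne.symm h3,
    Ne.symm h4, Ne.symm h5, Ne.symm h6]
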